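-- pv_equiv track=rewrite | github.com/msns83/UT_CE_Projects | Algorihm Design/1/1.py | count_same_BSD
-- ===== SOURCE A (Python) =====
-- import math
--
-- mod = 1000000007
--
-- def combination(n , k):
--     return math.factorial(n) // (math.factorial(n-k)* math.factorial(k))
--
-- def count_same_BSD(Arr):
--     if (len(Arr) < 3):
--         return 1
--
--     smallers = []
--     biggers = []
--
--     for i in range(1,len(Arr)):
--         if (Arr[i] < Arr[0]):
--             smallers.append(Arr[i])
--         else:
--             biggers.append(Arr[i])
--
--     count_smallers = count_same_BSD(smallers)
--     count_biggers = count_same_BSD(biggers)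
--
--     ans = count_smallers * count_biggers * combination(len(Arr)-1,len(smallers))
--
--     return ans % mod
-- ===== SOURCE B (Python) =====
-- import math
--
-- mod = 1000000007
--
-- def count_same_BSD(Arr):
--     def insert(t, x):
--         if t is None:
--             return (x, None, None)
--         k, l, r = t
--         if x < k:
--             return (k, insert(l, x), r)
--         return (k, l, insert(r, x))
--
--     def sp(t):
--         # (subtree size, product of all subtree sizes inside t)
--         if t is None:
--             return (0, 1)
--         _, l, r = t
--         sl, pl = sp(l)
--         sr, pr = sp(r)
--         s = sl + sr + 1
--         return (s, s * pl * pr)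
--
--     t = None
--     for x in Arr:
--         t = insert(t, x)
--     _, prod = sp(t)
--     return math.factorial(len(Arr)) // prod % mod
-- ===== Notes on version B (the rewrite author's own statement) =====
-- stated objective: simpler
-- what changed: B replaces A's recursive partition + binomial-coefficient recursion by explicitly building the BST via insertions and returning n! // (product of all subtree sizes) % mod, the hook-length formula, with no length-3 guard.
import Mathlib
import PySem

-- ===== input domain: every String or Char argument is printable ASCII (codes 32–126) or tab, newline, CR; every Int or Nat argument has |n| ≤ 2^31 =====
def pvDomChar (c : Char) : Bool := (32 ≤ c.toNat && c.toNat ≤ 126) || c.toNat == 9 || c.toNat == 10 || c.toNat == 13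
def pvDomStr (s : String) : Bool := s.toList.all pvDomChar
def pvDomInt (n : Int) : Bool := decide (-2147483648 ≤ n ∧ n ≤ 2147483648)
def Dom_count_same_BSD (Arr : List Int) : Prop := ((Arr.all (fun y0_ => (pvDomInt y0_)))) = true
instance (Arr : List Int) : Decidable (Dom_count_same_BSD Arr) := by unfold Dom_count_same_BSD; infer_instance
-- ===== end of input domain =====

-- B replaces A's recursive partition-and-binomial recursion by an explicit BST build plus the
-- hook-length formula n! / (product of subtree sizes); objective: simpler (same exact result).

-- ===== PORT A =====
-- math.factorial(n) for n ≥ 0 (A only calls it with nonnegative arguments)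
def pyFactorial (n : Int) : Int := (Nat.factorial n.toNat : Int)

def combination (n k : Int) : Int :=
  PySem.Int.floordiv (pyFactorial n) (pyFactorial (n - k) * pyFactorial k)

def count_same_BSD : List Int → Int
  | [] => 1
  | a :: rest =>
    if (a :: rest).length < 3 then 1
    else
      PySem.Int.mod
        (count_same_BSD (rest.filter (fun x => decide (x < a))) *
         count_same_BSD (rest.filter (fun x => !decide (x < a))) *
         combination (((a :: rest).length : Int) - 1)
           ((rest.filter (fun x => decide (x < a))).length : Int))
        1000000007
termination_by Arr => Arr.length
decreasing_by
  all_goals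
    exact Nat.lt_succ_of_le (by simpa using List.length_filter_le _ rest.attach)

-- ===== PORT B =====
inductive BSTree where
  | leaf : BSTree
  | node : Int → BSTree → BSTree → BSTree

def bstInsert : BSTree → Int → BSTree
  | BSTree.leaf, x => BSTree.node x BSTree.leaf BSTree.leaf
  | BSTree.node k l r, x =>
    if x < k then BSTree.node k (bstInsert l x) r else BSTree.node k l (bstInsert r x)

-- (subtree size, product of all subtree sizes inside t)
def bstSP : BSTree → Int × Int
  | BSTree.leaf => (0, 1)
  | BSTree.node _ l r =>
    let sl := (bstSP l).1
    let pl := (bstSP l).2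
    let sr := (bstSP r).1
    let pr := (bstSP r).2
    (sl + sr + 1, (sl + sr + 1) * pl * pr)

def count_same_BSD_alt (Arr : List Int) : Int :=
  PySem.Int.mod
    (PySem.Int.floordiv ((Nat.factorial Arr.length : Nat) : Int)
      (bstSP (Arr.foldl bstInsert BSTree.leaf)).2)
    1000000007

-- ===== PRECONDITION & SPEC =====
def Spec_count_same_BSD (Arr : List Int) (out : Int) : Prop := out = count_same_BSD_alt Arr
instance (Arr : List Int) (out : Int) : Decidable (Spec_count_same_BSD Arr out) := by unfold Spec_count_same_BSD; infer_instance

-- ===== CLAIM (what is proved, stated in full; the proofs are below) =====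
def Claim_equal_count_same_BSD : Prop := ∀ (Arr : List Int), Dom_count_same_BSD Arr → Spec_count_same_BSD Arr (count_same_BSD Arr)

-- ===== LEMMAS AND PROOFS =====

-- the exact (un-modded) count both programs reduce: U s * U b * C(|rest|, |s|)
def pvU : List Int → Int
  | [] => 1
  | a :: rest =>
    pvU (rest.filter (fun x => decide (x < a))) *
    pvU (rest.filter (fun x => !decide (x < a))) *
    (Nat.choose rest.length ((rest.filter (fun x => decide (x < a))).length) : Int)
termination_by Arr => Arr.length
decreasing_by
  all_goals
    exact Nat.lt_succ_of_le (by simpa using List.length_filter_le _ rest.attach)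

lemma pv_filter_split_len (f : Int → Bool) (xs : List Int) :
    (xs.filter f).length + (xs.filter (fun x => !f x)).length = xs.length := by
  induction xs with
  | nil => simp
  | cons x xs ih =>
    by_cases h : f x = true <;> simp [List.filter, h, ← ih] <;> omega

lemma pv_comb_eq (m k : Nat) (h : k ≤ m) :
    combination (m : Int) (k : Int) = (Nat.choose m k : Int) := by
  unfold combination pyFactorial
  have h1 : ((m : Int) - (k : Int)) = ((m - k : Nat) : Int) := by push_cast [h]; ring
  rw [h1, Int.toNat_natCast, Int.toNat_natCast, ← Nat.cast_mul, PySem.Int.floordiv_natCast]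
  norm_cast
  rw [Nat.choose_eq_factorial_div_factorial h, Nat.mul_comm]

lemma pv_mod_mul (x y c : Int) :
    (x % 1000000007 * (y % 1000000007) * c) % 1000000007 = (x * y * c) % 1000000007 := by
  conv_lhs => rw [Int.mul_emod, Int.mul_emod (x % 1000000007), Int.emod_emod_of_dvd x dvd_rfl,
    Int.emod_emod_of_dvd y dvd_rfl]
  conv_rhs => rw [Int.mul_emod, Int.mul_emod x]

lemma pv_A_eq_U : ∀ (n : Nat) (Arr : List Int), Arr.length ≤ n →
    count_same_BSD Arr = PySem.Int.mod (pvU Arr) 1000000007 := by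
  intro n
  induction n with
  | zero =>
    intro Arr h
    have : Arr = [] := List.eq_nil_of_length_eq_zero (Nat.le_zero.mp h)
    subst this; simp [count_same_BSD, pvU]
  | succ n ih =>
    intro Arr h
    match Arr with
    | [] => simp [count_same_BSD, pvU]
    | a :: rest =>
      have hr : rest.length ≤ n := by simpa using h
      by_cases hlen : (a :: rest).length < 3
      · -- rest has length ≤ 1
        rw [count_same_BSD, if_pos hlen]
        match rest, (by simp at hlen; omega : rest.length < 2) with
        | [], _ => simp [pvU]
        | [b], _ =>
          by_cases hb : b < a
          · simp only [pvU, List.filter, hb, decide_true, Bool.not_true]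
            norm_num [pvU]
          · simp only [pvU, List.filter, hb, decide_false, Bool.not_false]
            norm_num [pvU]
      · rw [count_same_BSD, if_neg hlen, pvU]
        have hs := List.length_filter_le (fun x => decide (x < a)) rest
        have hbn := List.length_filter_le (fun x => !decide (x < a)) rest
        rw [ih _ (hs.trans hr), ih _ (hbn.trans hr)]
        have hcast : (((a :: rest).length : Int) - 1) = (rest.length : Int) := by
          simp [List.length_cons]
        rw [hcast, pv_comb_eq rest.length _ hs]
        rw [PySem.Int.mod_eq_emod_of_pos (by norm_num), PySem.Int.mod_eq_emod_of_pos (by norm_num),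
          PySem.Int.mod_eq_emod_of_pos (by norm_num), PySem.Int.mod_eq_emod_of_pos (by norm_num)]
        exact pv_mod_mul _ _ _

lemma pv_foldl_insert_node (a : Int) (xs : List Int) : ∀ (L R : BSTree),
    xs.foldl bstInsert (BSTree.node a L R) =
      BSTree.node a ((xs.filter (fun x => decide (x < a))).foldl bstInsert L)
                    ((xs.filter (fun x => !decide (x < a))).foldl bstInsert R) := by
  induction xs with
  | nil => intro L R; simp
  | cons x xs ih =>
    intro L R
    by_cases hx : x < a
    · simp [List.filter, hx, List.foldl, bstInsert, ih]
    · simp [List.filter, hx, List.foldl, bstInsert, ih]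

lemma pv_build_cons (a : Int) (rest : List Int) :
    (a :: rest).foldl bstInsert BSTree.leaf =
      BSTree.node a ((rest.filter (fun x => decide (x < a))).foldl bstInsert BSTree.leaf)
                    ((rest.filter (fun x => !decide (x < a))).foldl bstInsert BSTree.leaf) := by
  show rest.foldl bstInsert (bstInsert BSTree.leaf a) = _
  rw [show bstInsert BSTree.leaf a = BSTree.node a BSTree.leaf BSTree.leaf from rfl,
    pv_foldl_insert_node]

lemma pv_B_invariant : ∀ (n : Nat) (Arr : List Int), Arr.length ≤ n →
    (bstSP (Arr.foldl bstInsert BSTree.leaf)).1 = (Arr.length : Int) ∧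
    0 < (bstSP (Arr.foldl bstInsert BSTree.leaf)).2 ∧
    pvU Arr * (bstSP (Arr.foldl bstInsert BSTree.leaf)).2 = ((Nat.factorial Arr.length : Nat) : Int) := by
  intro n
  induction n with
  | zero =>
    intro Arr h
    have : Arr = [] := List.eq_nil_of_length_eq_zero (Nat.le_zero.mp h)
    subst this
    refine ⟨rfl, by norm_num [List.foldl, bstSP], by norm_num [List.foldl, bstSP, pvU, Nat.factorial]⟩
  | succ n ih =>
    intro Arr h
    match Arr with
    | [] =>
      refine ⟨rfl, by norm_num [List.foldl, bstSP], by norm_num [List.foldl, bstSP, pvU, Nat.factorial]⟩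
    | a :: rest =>
      have hr : rest.length ≤ n := by simpa using h
      set s := rest.filter (fun x => decide (x < a)) with hs_def
      set b := rest.filter (fun x => !decide (x < a)) with hb_def
      have hs : s.length ≤ rest.length := List.length_filter_le _ _
      have hb : b.length ≤ rest.length := List.length_filter_le _ _
      obtain ⟨ih1s, ih2s, ih3s⟩ := ih s (hs.trans hr)
      obtain ⟨ih1b, ih2b, ih3b⟩ := ih b (hb.trans hr)
      have hsum : s.length + b.length = rest.length := pv_filter_split_len _ rest
      rw [pv_build_cons, ← hs_def, ← hb_def]
      simp only [bstSP]
      constructor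
      · rw [ih1s, ih1b]; push_cast [List.length_cons]; omega
      constructor
      · rw [ih1s, ih1b]
        have : (0:Int) < (s.length : Int) + (b.length : Int) + 1 := by positivity
        exact mul_pos (mul_pos this ih2s) ih2b
      · rw [ih1s, ih1b, pvU, ← hs_def, ← hb_def]
        have hchoose : Nat.choose rest.length s.length * Nat.factorial s.length *
            Nat.factorial (rest.length - s.length) = Nat.factorial rest.length :=
          Nat.choose_mul_factorial_mul_factorial hs
        have hbl : b.length = rest.length - s.length := by omega
        calc pvU s * pvU b * (Nat.choose rest.length s.length : Int) *
              (((s.length : Int) + (b.length : Int) + 1) *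
               (bstSP (s.foldl bstInsert BSTree.leaf)).2 *
               (bstSP (b.foldl bstInsert BSTree.leaf)).2)
            = (pvU s * (bstSP (s.foldl bstInsert BSTree.leaf)).2) *
              (pvU b * (bstSP (b.foldl bstInsert BSTree.leaf)).2) *
              (Nat.choose rest.length s.length : Int) *
              ((s.length : Int) + (b.length : Int) + 1) := by ring
          _ = ((Nat.factorial s.length : Nat) : Int) * ((Nat.factorial b.length : Nat) : Int) *
              (Nat.choose rest.length s.length : Int) *
              ((s.length : Int) + (b.length : Int) + 1) := by rw [ih3s, ih3b]
          _ = ((Nat.factorial (a :: rest).length : Nat) : Int) := by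
              rw [hbl]
              have h2 : ((s.length : Int) + ((rest.length - s.length : Nat) : Int) + 1) =
                  ((rest.length + 1 : Nat) : Int) := by push_cast [hs]; ring
              have hbl2 : ((Nat.factorial (rest.length - s.length) : Nat) : Int) =
                  ((Nat.factorial (rest.length - s.length) : Nat) : Int) := rfl
              rw [show b.length = rest.length - s.length from hbl] at *
              rw [h2]
              push_cast [← hchoose, List.length_cons, Nat.factorial_succ]
              ring

lemma pv_B_eq_U (Arr : List Int) :
    count_same_BSD_alt Arr = PySem.Int.mod (pvU Arr) 1000000007 := by
  obtain ⟨_, h2, h3⟩ := pv_B_invariant Arr.length Arr le_rfl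
  unfold count_same_BSD_alt
  rw [← h3, PySem.Int.floordiv_eq_ediv_of_pos h2, Int.mul_ediv_cancel _ (ne_of_gt h2)]

-- ===== VERDICT (by name: the statement is the Claim_ definition above) =====
theorem count_same_BSD_spec : Claim_equal_count_same_BSD := by
  intro Arr _
  unfold Spec_count_same_BSD
  rw [pv_A_eq_U Arr.length Arr le_rfl, pv_B_eq_U]
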